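-- pv_equiv track=rewrite | github.com/nguyentieuat/ai-korean-study-partner | ai-korean-be/mfa_service/train_w2v2/ko_num_unit_verbalizer.py | _sino_int
-- ===== SOURCE A (Python) =====
-- _SINO_DIGITS = ["영","일","이","삼","사","오","육","칠","팔","구"]
--
-- _SINO_SMALL = [(1000,"천"),(100,"백"),(10,"십")]
--
-- _SINO_BIG   = [(10**12,"조"),(10**8,"억"),(10**4,"만")]
--
-- def _sino_int(n: int) -> str:
--     """Read non-negative integer in Sino-Korean (e.g., 123 -> 백 이십 삼)."""
--     if n == 0:
--         return "영"
--     out = []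
--     def _chunk_to_sino(x: int) -> str:
--         if x == 0:
--             return ""
--         parts = []
--         for val, name in _SINO_SMALL:
--             q, x = divmod(x, val)
--             if q:
--                 parts.append(name if q == 1 else _SINO_DIGITS[q] + " " + name)
--         if x:
--             parts.append(_SINO_DIGITS[x])
--         return " ".join(parts).strip()
--     for val, name in _SINO_BIG:
--         q, n = divmod(n, val)
--         if q:
--             out.append((_chunk_to_sino(q) + " " + name).strip())
--     if n:
--         out.append(_chunk_to_sino(n))
--     return " ".join(out).strip()
-- ===== SOURCE B (Python) =====
-- _SINO_DIGITS = ["영","일","이","삼","사","오","육","칠","팔","구"]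
-- _SINO_SMALL_UNITS = ["", "십", "백", "천"]          # unit for power % 4
-- _SINO_GROUP_UNITS = ["", "만", "억", "조"]          # unit for power // 4
--
-- def _sino_int(n: int) -> str:
--     """Read non-negative integer in Sino-Korean, one MSD-to-LSD digit walk."""
--     if n == 0:
--         return "영"
--     digits = []                    # least-significant first
--     while n > 0:
--         n, d = divmod(n, 10)
--         digits.append(d)
--     tokens = []
--     group_nonzero = False
--     p = len(digits)                # power of ten of the current digit + 1
--     for d in reversed(digits):
--         p -= 1
--         if d:
--             group_nonzero = True
--             if p % 4 == 0:
--                 tokens.append(_SINO_DIGITS[d])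
--             elif d == 1:
--                 tokens.append(_SINO_SMALL_UNITS[p % 4])
--             else:
--                 tokens.append(_SINO_DIGITS[d])
--                 tokens.append(_SINO_SMALL_UNITS[p % 4])
--         if p % 4 == 0:
--             if group_nonzero and p:
--                 tokens.append(_SINO_GROUP_UNITS[p // 4])
--             group_nonzero = False
--     return " ".join(tokens)
-- ===== Notes on version B (the rewrite author's own statement) =====
-- stated objective: alternative
-- what changed: A divides by fixed big units (10^12/10^8/10^4) and, per chunk, by 1000/100/10, building space-joined chunk strings that are stripped and re-joined; B extracts the decimal digits once and walks them MSD-to-LSD in a single pass, picking the small unit from power%4 and the group unit from power//4 with a group-nonzero flag, emitting flat tokens joined once at the end.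
-- outside the precondition, e.g. on _sino_int(-1): A returns '구 천 구 백 구 십 구 조 구 천 구 백 구 십 구 억 구 천 구 백 구 십 구 만 구 천 구 백 구 십 구', B returns ''
import Mathlib
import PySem

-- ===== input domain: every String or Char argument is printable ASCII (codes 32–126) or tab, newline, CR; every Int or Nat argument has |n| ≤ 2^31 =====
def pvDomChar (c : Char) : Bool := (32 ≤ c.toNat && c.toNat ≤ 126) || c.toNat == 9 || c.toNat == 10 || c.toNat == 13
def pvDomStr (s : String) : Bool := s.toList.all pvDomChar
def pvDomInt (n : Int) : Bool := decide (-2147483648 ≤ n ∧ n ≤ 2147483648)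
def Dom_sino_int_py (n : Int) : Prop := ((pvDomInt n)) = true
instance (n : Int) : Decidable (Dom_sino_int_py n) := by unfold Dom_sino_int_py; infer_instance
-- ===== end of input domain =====

-- B walks the decimal digits once, MSD to LSD, emitting tokens; A divides by fixed big/small
-- units building space-joined chunk strings. Equivalence is proved for all 0 ≤ n in Dom;
-- Pre_ excludes negative n, where A's value comes from negative-index wraparound (B's digit
-- loop sees no digits and returns ''). String building is ported over List Char (PySem.Chars), exact.


-- ===== PORT A =====
-- _SINO_DIGITS, as lists of code points
def sinoDigitsC : List (List Char) :=
  [['영'],['일'],['이'],['삼'],['사'],['오'],['육'],['칠'],['팔'],['구']]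
-- _SINO_DIGITS[q] with Python (possibly negative) indexing; in-range on every input A accepts
def digAt (q : Int) : List Char := (PySem.List.pyGet? sinoDigitsC q).getD []
-- _SINO_SMALL / _SINO_BIG
def sinoSmallC : List (Int × List Char) := [(1000,['천']),(100,['백']),(10,['십'])]
def sinoBigC : List (Int × List Char) :=
  [(1000000000000,['조']),(100000000,['억']),(10000,['만'])]

-- _chunk_to_sino: fold over _SINO_SMALL carrying (parts, x); loop body as named helper
def chunkStep (acc : List (List Char) × Int) (vn : Int × List Char) : List (List Char) × Int :=
  let q := PySem.Int.floordiv acc.2 vn.1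
  let x' := PySem.Int.mod acc.2 vn.1
  if q ≠ 0 then
    (acc.1 ++ [if q == 1 then vn.2 else digAt q ++ [' '] ++ vn.2], x')
  else (acc.1, x')

def chunkToSino (x : Int) : List Char :=
  if x == 0 then [] else
  let st := sinoSmallC.foldl chunkStep ([], x)
  let parts := if st.2 ≠ 0 then st.1 ++ [digAt st.2] else st.1
  PySem.Chars.strip (PySem.Chars.join [' '] parts)

-- the `for val, name in _SINO_BIG` loop body
def bigStep (acc : List (List Char) × Int) (vn : Int × List Char) : List (List Char) × Int :=
  let q := PySem.Int.floordiv acc.2 vn.1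
  let r := PySem.Int.mod acc.2 vn.1
  if q ≠ 0 then
    (acc.1 ++ [PySem.Chars.strip (chunkToSino q ++ [' '] ++ vn.2)], r)
  else (acc.1, r)

def sino_int_py (n : Int) : String :=
  if n == 0 then "영" else
  let st := sinoBigC.foldl bigStep ([], n)
  let out := if st.2 ≠ 0 then st.1 ++ [chunkToSino st.2] else st.1
  String.ofList (PySem.Chars.strip (PySem.Chars.join [' '] out))

-- ===== PORT B =====
-- Source B's own _SINO_DIGITS table
def sinoDigitsB : List (List Char) :=
  [['영'],['일'],['이'],['삼'],['사'],['오'],['육'],['칠'],['팔'],['구']]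
def smallUnitsC : List (List Char) := [[],['십'],['백'],['천']]
def groupUnitsC : List (List Char) := [[],['만'],['억'],['조']]
-- the `while n > 0: n, d = divmod(n, 10)` loop (LSD first); on n ≤ 0 it yields no digits,
-- so recursion on n.toNat is a faithful transcription on every input
def bDigitsRev (m : Nat) : List Nat :=
  if m = 0 then [] else m % 10 :: bDigitsRev (m / 10)

-- one iteration of the `for d in reversed(digits)` loop; state = (tokens, group_nonzero, p)
def bStep (acc : List (List Char) × Bool × Nat) (d : Nat) : List (List Char) × Bool × Nat :=
  let p := acc.2.2 - 1
  let acc1 : List (List Char) × Bool :=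
    if d ≠ 0 then
      (acc.1 ++
        (if p % 4 = 0 then [sinoDigitsB.getD d []]
         else if d = 1 then [smallUnitsC.getD (p % 4) []]
         else [sinoDigitsB.getD d [], smallUnitsC.getD (p % 4) []]), true)
    else (acc.1, acc.2.1)
  if p % 4 = 0 then
    (if acc1.2 ∧ p ≠ 0 then acc1.1 ++ [groupUnitsC.getD (p / 4) []] else acc1.1, false, p)
  else (acc1.1, acc1.2, p)

def sino_int_py_alt (n : Int) : String :=
  if n == 0 then "영" else
  let digits := bDigitsRev n.toNat
  let st := digits.reverse.foldl bStep ([], false, digits.length)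
  String.ofList (PySem.Chars.join [' '] st.1)

-- ===== PRECONDITION & SPEC =====
-- Pre_ excludes negative n (A's docstring says non-negative): there A's value is an accident
-- of floor-divmod plus negative list indexing, while B sees no digits and returns ''.
def Pre_sino_int_py (n : Int) : Prop := 0 ≤ n
instance (n : Int) : Decidable (Pre_sino_int_py n) := by unfold Pre_sino_int_py; infer_instance
def pvWitness_sino_int_py : Int := (20010) 
def Spec_sino_int_py (n : Int) (out : String) : Prop := out = sino_int_py_alt n
instance (n : Int) (out : String) : Decidable (Spec_sino_int_py n out) := by unfold Spec_sino_int_py; infer_instance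

-- ===== CLAIM (what is proved, stated in full; the proofs are below) =====
def Claim_equal_sino_int_py : Prop := ∀ (n : Int), Dom_sino_int_py n → Pre_sino_int_py n → Spec_sino_int_py n (sino_int_py n)

-- ===== LEMMAS AND PROOFS =====

-- sep and canonical token lists ------------------------------------------------
def digN (d : Nat) : List Char := sinoDigitsC.getD d []

def pieceN (d j : Nat) : List (List Char) :=
  if d = 0 then []
  else if j = 0 then [digN d]
  else if d = 1 then [smallUnitsC.getD j []]
  else [digN d, smallUnitsC.getD j []]

def groupToks (g : Nat) : List (List Char) :=
  pieceN (g / 1000) 3 ++ pieceN (g / 100 % 10) 2 ++ pieceN (g / 10 % 10) 1 ++ pieceN (g % 10) 0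

def allToks (m : Nat) : List (List Char) :=
  (if m / 100000000 ≠ 0 then groupToks (m / 100000000) ++ [['억']] else []) ++
  (if m % 100000000 / 10000 ≠ 0 then groupToks (m % 100000000 / 10000) ++ [['만']] else []) ++
  groupToks (m % 10000)

def GoodTok (t : List Char) : Prop := ∃ c, t = [c] ∧ PySem.Chars.isspace c = false
def GoodToks (l : List (List Char)) : Prop := ∀ t ∈ l, GoodTok t

-- join lemmas ------------------------------------------------------------------
theorem join_app (s : List Char) (xs ys : List (List Char)) :
    PySem.Chars.join s (xs ++ ys) =
      PySem.Chars.join s xs ++ (if xs = [] ∨ ys = [] then [] else s) ++ PySem.Chars.join s ys := by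
  induction xs with
  | nil => simp
  | cons x xs ih =>
    cases xs with
    | nil =>
      cases ys with
      | nil => simp [PySem.Chars.join_singleton]
      | cons y ys => simp [PySem.Chars.join_cons_cons, PySem.Chars.join_singleton]
    | cons b xs' =>
      have h1 : (x :: b :: xs') ++ ys = x :: b :: (xs' ++ ys) := rfl
      rw [h1, PySem.Chars.join_cons_cons, PySem.Chars.join_cons_cons]
      have h2 : (b :: (xs' ++ ys)) = (b :: xs') ++ ys := rfl
      rw [h2, ih]
      simp [List.append_assoc]

theorem join_head (l : List (List Char)) (h : GoodToks l) (hne : l ≠ []) :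
    ∃ c r, PySem.Chars.join [' '] l = c :: r ∧ PySem.Chars.isspace c = false := by
  induction l with
  | nil => exact absurd rfl hne
  | cons t l ih =>
    obtain ⟨c, hc, hcs⟩ := h t (List.mem_cons_self ..)
    cases l with
    | nil => exact ⟨c, [], by simp [PySem.Chars.join_singleton, hc], hcs⟩
    | cons b l' =>
      refine ⟨c, ?_, ?_, hcs⟩
      · exact (t.tail ++ [' '] ++ PySem.Chars.join [' '] (b :: l'))
      · rw [PySem.Chars.join_cons_cons, hc]; rfl

theorem join_last (l : List (List Char)) (h : GoodToks l) (hne : l ≠ []) :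
    ∃ r c, PySem.Chars.join [' '] l = r ++ [c] ∧ PySem.Chars.isspace c = false := by
  induction l with
  | nil => exact absurd rfl hne
  | cons t l ih =>
    cases l with
    | nil =>
      obtain ⟨c, hc, hcs⟩ := h t (List.mem_cons_self ..)
      exact ⟨[], c, by simp [PySem.Chars.join_singleton, hc], hcs⟩
    | cons b l' =>
      obtain ⟨r, c, hr, hcs⟩ := ih (fun u hu => h u (List.mem_cons_of_mem _ hu)) (by simp)
      refine ⟨t ++ [' '] ++ r, c, ?_, hcs⟩
      rw [PySem.Chars.join_cons_cons, hr]
      simp [List.append_assoc]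

theorem strip_good (l : List (List Char)) (h : GoodToks l) :
    PySem.Chars.strip (PySem.Chars.join [' '] l) = PySem.Chars.join [' '] l := by
  cases hl : l with
  | nil => simp [PySem.Chars.strip, PySem.Chars.lstrip, PySem.Chars.rstrip]
  | cons t l' =>
    obtain ⟨c, r, hj, hc⟩ := join_head l h (by simp [hl])
    obtain ⟨r2, c2, hj2, hc2⟩ := join_last l h (by simp [hl])
    rw [← hl, PySem.Chars.strip, PySem.Chars.lstrip]
    rw [hj, List.dropWhile_cons_of_neg (by simp [hc]), ← hj, hj2, PySem.Chars.rstrip]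
    simp [List.dropWhile_cons_of_neg, hc2]

-- parts-of: the list of chunk strings A joins, vs the flat token list ------------
def partsOf (P : List (List (List Char))) : List (List Char) :=
  P.filterMap (fun l => if l = [] then none else some (PySem.Chars.join [' '] l))

theorem partsOf_nil_iff (P : List (List (List Char))) : partsOf P = [] ↔ P.flatten = [] := by
  induction P with
  | nil => simp [partsOf]
  | cons l P ih =>
    by_cases hl : l = []
    · simp [partsOf, hl]
    · simp [partsOf, hl]

theorem join_partsOf (P : List (List (List Char))) :
    PySem.Chars.join [' '] (partsOf P) = PySem.Chars.join [' '] P.flatten := by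
  induction P with
  | nil => rfl
  | cons l P ih =>
    by_cases hl : l = []
    · simp [partsOf, hl]
      simpa [partsOf, hl] using ih
    · have h1 : partsOf (l :: P) = [PySem.Chars.join [' '] l] ++ partsOf P := by
        simp [partsOf, List.filterMap_cons, hl]
      rw [h1, join_app, List.flatten_cons, join_app, ih, PySem.Chars.join_singleton]
      have h2 : (partsOf P = []) ↔ (P.flatten = []) := partsOf_nil_iff P
      by_cases hp : P.flatten = []
      · simp [hp, h2.mpr hp, hl]
      · have hpp : partsOf P ≠ [] := fun hq => hp (h2.mp hq)
        simp [hp, hpp, hl]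

-- goodness facts -----------------------------------------------------------------
theorem digN_good (d : Nat) (hd : d ≤ 9) : GoodTok (digN d) := by interval_cases d <;> exact ⟨_, rfl, by decide⟩
theorem pieceN_good (d j : Nat) (hd : d ≤ 9) (hj : j ≤ 3) : GoodToks (pieceN d j) := by
  intro t ht
  unfold pieceN at ht
  split_ifs at ht with h1 h2 h3
  · simp at ht
  · simp at ht; subst ht; exact digN_good d hd
  · simp at ht; subst ht
    interval_cases j
    · exact absurd rfl h2
    · exact ⟨_, rfl, by decide⟩
    · exact ⟨_, rfl, by decide⟩
    · exact ⟨_, rfl, by decide⟩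
  · simp at ht
    rcases ht with ht | ht
    · subst ht; exact digN_good d hd
    · subst ht
      interval_cases j
      · exact absurd rfl h2
      · exact ⟨_, rfl, by decide⟩
      · exact ⟨_, rfl, by decide⟩
      · exact ⟨_, rfl, by decide⟩
theorem goodToks_append {a b : List (List Char)} (ha : GoodToks a) (hb : GoodToks b) :
    GoodToks (a ++ b) := by
  intro t ht
  rcases List.mem_append.mp ht with h | h
  · exact ha t h
  · exact hb t h
theorem groupToks_good (g : Nat) (hg : g < 10000) : GoodToks (groupToks g) := by
  unfold groupToks
  exact goodToks_append (goodToks_append (goodToks_append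
    (pieceN_good _ _ (by omega) (by omega)) (pieceN_good _ _ (by omega) (by omega)))
    (pieceN_good _ _ (by omega) (by omega))) (pieceN_good _ _ (by omega) (by omega))
theorem pieceN_ne_nil (d j : Nat) (hd : d ≠ 0) : pieceN d j ≠ [] := by
  unfold pieceN; split_ifs <;> simp_all
theorem groupToks_nil_iff (g : Nat) (hg : g < 10000) : groupToks g = [] ↔ g = 0 := by
  constructor
  · intro h
    unfold groupToks at h
    rcases List.append_eq_nil_iff.mp h with ⟨h', h0⟩
    rcases List.append_eq_nil_iff.mp h' with ⟨h'', h1⟩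
    rcases List.append_eq_nil_iff.mp h'' with ⟨h3, h2⟩
    have e3 : g / 1000 = 0 := by by_contra hc; exact pieceN_ne_nil _ _ hc h3
    have e2 : g / 100 % 10 = 0 := by by_contra hc; exact pieceN_ne_nil _ _ hc h2
    have e1 : g / 10 % 10 = 0 := by by_contra hc; exact pieceN_ne_nil _ _ hc h1
    have e0 : g % 10 = 0 := by by_contra hc; exact pieceN_ne_nil _ _ hc h0
    omega
  · intro h; subst h; rfl
theorem allToks_good (m : Nat) (hm : m ≤ 2147483648) : GoodToks (allToks m) := by
  unfold allToks
  apply goodToks_append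
  apply goodToks_append
  · split_ifs with h
    · exact goodToks_append (groupToks_good _ (by omega))
        (by intro t ht; simp at ht; exact ⟨'억', by simp [ht], by decide⟩)
    · intro t ht; simp at ht
  · split_ifs with h
    · exact goodToks_append (groupToks_good _ (by omega))
        (by intro t ht; simp at ht; exact ⟨'만', by simp [ht], by decide⟩)
    · intro t ht; simp at ht
  · exact groupToks_good _ (by omega)

theorem fdivC (a b : Nat) : PySem.Int.floordiv (a : Int) (b : Int) = ((a / b : Nat) : Int) := by
  simp [PySem.Int.floordiv, Int.fdiv_eq_ediv]

theorem fmodC (a b : Nat) : PySem.Int.mod (a : Int) (b : Int) = ((a % b : Nat) : Int) := by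
  simp [PySem.Int.mod, Int.fmod_eq_emod]

-- A side ------------------------------------------------------------------------
theorem digAt_nat (d : Nat) (hd : d ≤ 9) : digAt (d : Nat) = digN d := by interval_cases d <;> rfl

theorem chunkStep_nat (parts : List (List Char)) (a v : Nat) (u : List Char) :
    chunkStep (parts, (a : Nat)) ((v : Nat), u)
      = (parts ++ (if a / v = 0 then []
          else [if a / v = 1 then u else digAt (↑(a / v)) ++ [' '] ++ u]),
         ((a % v : Nat) : Int)) := by
  simp only [chunkStep, fdivC, fmodC, ne_eq, Int.natCast_eq_zero,
    show ((1:Int)) = ((1:Nat):Int) from by norm_num, beq_iff_eq, Nat.cast_inj]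
  split_ifs <;> simp_all

theorem pieceJoin (d j : Nat) (hd : d ≤ 9) (hj0 : j ≠ 0) (hj : j ≤ 3) :
    (if d = 0 then []
      else [if d = 1 then smallUnitsC.getD j [] else digAt (↑d) ++ [' '] ++ smallUnitsC.getD j []])
      = partsOf [pieceN d j] := by
  by_cases h0 : d = 0
  · simp [h0, partsOf, pieceN]
  · by_cases h1 : d = 1
    · simp [h0, h1, partsOf, pieceN, hj0, PySem.Chars.join_singleton]
    · simp [h0, h1, partsOf, pieceN, hj0, digAt_nat d hd,
        PySem.Chars.join_cons_cons, PySem.Chars.join_singleton]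

theorem pieceJoin0 (d : Nat) (hd : d ≤ 9) :
    (if d = 0 then [] else [digAt (↑d)]) = partsOf [pieceN d 0] := by
  by_cases h0 : d = 0
  · simp [h0, partsOf, pieceN]
  · simp [h0, partsOf, pieceN, digAt_nat d hd, PySem.Chars.join_singleton]

theorem pieceJoin3 (d : Nat) (hd : d ≤ 9) :
    (if d = 0 then [] else [if d = 1 then ['천'] else digAt (↑d) ++ [' '] ++ ['천']])
      = partsOf [pieceN d 3] := by
  simpa [smallUnitsC] using pieceJoin d 3 hd (by omega) (by omega)

theorem pieceJoin2 (d : Nat) (hd : d ≤ 9) :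
    (if d = 0 then [] else [if d = 1 then ['백'] else digAt (↑d) ++ [' '] ++ ['백']])
      = partsOf [pieceN d 2] := by
  simpa [smallUnitsC] using pieceJoin d 2 hd (by omega) (by omega)

theorem pieceJoin1 (d : Nat) (hd : d ≤ 9) :
    (if d = 0 then [] else [if d = 1 then ['십'] else digAt (↑d) ++ [' '] ++ ['십']])
      = partsOf [pieceN d 1] := by
  simpa [smallUnitsC] using pieceJoin d 1 hd (by omega) (by omega)

theorem ones_if (E : List (List Char)) (d : Nat) :
    (if ¬ d = 0 then E ++ [digAt (↑d)] else E) = E ++ (if d = 0 then [] else [digAt (↑d)]) := by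
  split_ifs <;> simp

theorem chunk_eq (g : Nat) (hg : g < 10000) :
    chunkToSino (g : Nat) = PySem.Chars.join [' '] (groupToks g) := by
  by_cases h0 : g = 0
  · subst h0
    show chunkToSino ((0:Nat) : Int) = _
    norm_num [chunkToSino, groupToks, pieceN]
  · have hne : ((g : Int) == 0) = false := by simp [h0]
    simp only [chunkToSino, hne, Bool.false_eq_true, if_false, sinoSmallC,
      List.foldl_cons, List.foldl_nil,
      show ((1000:Int)) = ((1000:Nat):Int) from by norm_num,
      show ((100:Int)) = ((100:Nat):Int) from by norm_num,
      show ((10:Int)) = ((10:Nat):Int) from by norm_num]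
    rw [chunkStep_nat, chunkStep_nat, chunkStep_nat]
    simp only [ne_eq, Int.natCast_eq_zero,
      show g % 1000 / 100 = g / 100 % 10 from by omega,
      show g % 1000 % 100 / 10 = g / 10 % 10 from by omega,
      show g % 1000 % 100 % 10 = g % 10 from by omega]
    rw [ones_if]
    rw [pieceJoin3 (g / 1000) (by omega), pieceJoin2 (g / 100 % 10) (by omega),
        pieceJoin1 (g / 10 % 10) (by omega), pieceJoin0 (g % 10) (by omega)]
    have hP : (([] : List (List Char)) ++ partsOf [pieceN (g / 1000) 3]
          ++ partsOf [pieceN (g / 100 % 10) 2] ++ partsOf [pieceN (g / 10 % 10) 1])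
          ++ partsOf [pieceN (g % 10) 0]
        = partsOf [pieceN (g / 1000) 3, pieceN (g / 100 % 10) 2,
            pieceN (g / 10 % 10) 1, pieceN (g % 10) 0] := by
      simp only [partsOf, List.filterMap_cons, List.filterMap_nil]
      split_ifs <;> simp
    rw [hP, join_partsOf]
    have hflat : ([pieceN (g / 1000) 3, pieceN (g / 100 % 10) 2,
        pieceN (g / 10 % 10) 1, pieceN (g % 10) 0] : List _).flatten = groupToks g := by
      simp [groupToks, List.append_assoc]
    rw [hflat, strip_good _ (groupToks_good g hg)]

theorem bigStep_nat (out : List (List Char)) (a v : Nat) (u : List Char) :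
    bigStep (out, (a : Nat)) ((v : Nat), u)
      = (out ++ (if a / v = 0 then []
          else [PySem.Chars.strip (chunkToSino (↑(a / v)) ++ [' '] ++ u)]),
         ((a % v : Nat) : Int)) := by
  simp only [bigStep, fdivC, fmodC, ne_eq, Int.natCast_eq_zero]
  split_ifs <;> simp_all

theorem bigElem (q : Nat) (hq0 : q ≠ 0) (hq : q < 10000) (u : Char)
    (hu : PySem.Chars.isspace u = false) :
    PySem.Chars.strip (chunkToSino (q : Nat) ++ [' '] ++ [u])
      = PySem.Chars.join [' '] (groupToks q ++ [[u]]) := by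
  rw [chunk_eq q hq]
  have hgt : groupToks q ≠ [] := fun hh => hq0 ((groupToks_nil_iff q hq).mp hh)
  have hne : ¬ (groupToks q = [] ∨ ([[u]] : List (List Char)) = []) := by simp [hgt]
  have h1 : PySem.Chars.join [' '] (groupToks q ++ [[u]])
      = PySem.Chars.join [' '] (groupToks q) ++ [' '] ++ [u] := by
    rw [join_app, if_neg hne, PySem.Chars.join_singleton]
  rw [← h1]
  exact strip_good _ (goodToks_append (groupToks_good q hq)
    (by intro t ht; simp at ht; exact ⟨u, by simp [ht], hu⟩))

theorem ones_if' (E : List (List Char)) (d : Nat) (x : List Char) :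
    (if ¬ d = 0 then E ++ [x] else E) = E ++ (if d = 0 then [] else [x]) := by
  split_ifs <;> simp

theorem A_eq (m : Nat) (h0 : m ≠ 0) (hm : m ≤ 2147483648) :
    sino_int_py (m : Nat) = String.ofList (PySem.Chars.join [' '] (allToks m)) := by
  have hne : ((m : Int) == 0) = false := by simp [h0]
  simp only [sino_int_py, hne, Bool.false_eq_true, if_false, sinoBigC,
    List.foldl_cons, List.foldl_nil,
    show ((1000000000000:Int)) = ((1000000000000:Nat):Int) from by norm_num,
    show ((100000000:Int)) = ((100000000:Nat):Int) from by norm_num,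
    show ((10000:Int)) = ((10000:Nat):Int) from by norm_num]
  rw [bigStep_nat, bigStep_nat, bigStep_nat]
  simp only [show m / 1000000000000 = 0 from by omega,
    show m % 1000000000000 = m from by omega,
    show m % 100000000 % 10000 = m % 10000 from by omega,
    if_pos rfl, List.append_nil, ne_eq, Int.natCast_eq_zero]
  rw [ones_if']
  have e2 : (if m / 100000000 = 0 then ([] : List (List Char))
        else [PySem.Chars.strip (chunkToSino (↑(m / 100000000)) ++ [' '] ++ ['억'])])
      = partsOf [if m / 100000000 = 0 then [] else groupToks (m / 100000000) ++ [['억']]] := by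
    by_cases h : m / 100000000 = 0
    · simp [h, partsOf]
    · have hx : partsOf [groupToks (m / 100000000) ++ [['억']]]
          = [PySem.Chars.join [' '] (groupToks (m / 100000000) ++ [['억']])] := by
        simp [partsOf]
      rw [if_neg h, if_neg h, hx, bigElem _ h (by omega) '억' (by decide)]
  have e1 : (if m % 100000000 / 10000 = 0 then ([] : List (List Char))
        else [PySem.Chars.strip (chunkToSino (↑(m % 100000000 / 10000)) ++ [' '] ++ ['만'])])
      = partsOf [if m % 100000000 / 10000 = 0 then []
          else groupToks (m % 100000000 / 10000) ++ [['만']]] := by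
    by_cases h : m % 100000000 / 10000 = 0
    · simp [h, partsOf]
    · have hx : partsOf [groupToks (m % 100000000 / 10000) ++ [['만']]]
          = [PySem.Chars.join [' '] (groupToks (m % 100000000 / 10000) ++ [['만']])] := by
        simp [partsOf]
      rw [if_neg h, if_neg h, hx, bigElem _ h (by omega) '만' (by decide)]
  have e0 : (if m % 10000 = 0 then ([] : List (List Char))
        else [chunkToSino (↑(m % 10000))])
      = partsOf [groupToks (m % 10000)] := by
    by_cases h : m % 10000 = 0
    · simp [h, partsOf, show groupToks 0 = [] from rfl]
    · have hgt : groupToks (m % 10000) ≠ [] :=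
        fun hh => h ((groupToks_nil_iff _ (by omega)).mp hh)
      rw [if_neg h, chunk_eq (m % 10000) (by omega)]
      simp [partsOf, hgt]
  rw [e2, e1, e0]
  simp only [ite_true, List.nil_append]
  have hP : partsOf [if m / 100000000 = 0 then [] else groupToks (m / 100000000) ++ [['억']]]
        ++ partsOf [if m % 100000000 / 10000 = 0 then []
            else groupToks (m % 100000000 / 10000) ++ [['만']]]
        ++ partsOf [groupToks (m % 10000)]
      = partsOf [(if m / 100000000 = 0 then [] else groupToks (m / 100000000) ++ [['억']]),
          (if m % 100000000 / 10000 = 0 then []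
            else groupToks (m % 100000000 / 10000) ++ [['만']]),
          groupToks (m % 10000)] := by
    simp only [partsOf, List.filterMap_cons, List.filterMap_nil]
    split_ifs <;> simp
  rw [hP, join_partsOf]
  have hflat : ([(if m / 100000000 = 0 then [] else groupToks (m / 100000000) ++ [['억']]),
      (if m % 100000000 / 10000 = 0 then []
        else groupToks (m % 100000000 / 10000) ++ [['만']]),
      groupToks (m % 10000)] : List _).flatten = allToks m := by
    unfold allToks
    split_ifs <;> simp_all
  rw [hflat, strip_good _ (allToks_good m hm)]

-- B side ------------------------------------------------------------------------
def pad4 (g : Nat) : List Nat := [g / 1000, g / 100 % 10, g / 10 % 10, g % 10]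

theorem bStep_mid (toks : List (List Char)) (flag : Bool) (p d : Nat) (h : p % 4 ≠ 0) :
    bStep (toks, flag, p + 1) d = (toks ++ pieceN d (p % 4), (if d ≠ 0 then true else flag), p) := by
  by_cases h0 : d = 0 <;> by_cases h1 : d = 1 <;>
    simp [bStep, pieceN, digN, h, h0, h1, show sinoDigitsB = sinoDigitsC from rfl]

theorem bStep_bound (toks : List (List Char)) (flag : Bool) (p d : Nat) (h : p % 4 = 0) :
    bStep (toks, flag, p + 1) d =
      ((toks ++ pieceN d 0) ++
        (if ((if d ≠ 0 then true else flag) : Bool) = true ∧ p ≠ 0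
          then [groupUnitsC.getD (p / 4) []] else []), false, p) := by
  by_cases h0 : d = 0 <;> by_cases h1 : d = 1 <;>
    simp [bStep, pieceN, digN, h, h0, h1, show sinoDigitsB = sinoDigitsC from rfl] <;> split_ifs <;> simp_all

theorem fold_pad4 (g k : Nat) (hg : g < 10000) (toks : List (List Char)) (rest : List Nat) :
    List.foldl bStep (toks, false, 4 * k + 4) (pad4 g ++ rest) =
      List.foldl bStep
        (toks ++ groupToks g ++ (if g ≠ 0 ∧ k ≠ 0 then [groupUnitsC.getD k []] else []),
         false, 4 * k) rest := by
  have m3 : (4 * k + 3) % 4 = 3 := by omega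
  have m2 : (4 * k + 2) % 4 = 2 := by omega
  have m1 : (4 * k + 1) % 4 = 1 := by omega
  have m0 : (4 * k) % 4 = 0 := by omega
  have e4 : 4 * k + 4 = (4 * k + 3) + 1 := by omega
  simp only [pad4, List.cons_append, List.nil_append, List.foldl_cons, e4]
  rw [bStep_mid _ _ _ _ (by omega), m3]
  rw [show 4 * k + 3 = (4 * k + 2) + 1 by omega, bStep_mid _ _ _ _ (by omega), m2]
  rw [show 4 * k + 2 = (4 * k + 1) + 1 by omega, bStep_mid _ _ _ _ (by omega), m1]
  rw [show 4 * k + 1 = (4 * k) + 1 by omega, bStep_bound _ _ _ _ m0]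
  have hflag : ((if g % 10 ≠ 0 then true else
      if g / 10 % 10 ≠ 0 then true else
      if g / 100 % 10 ≠ 0 then true else
      if g / 1000 ≠ 0 then true else false) : Bool) = decide (g ≠ 0) := by
    split_ifs with h1 h2 h3 h4 <;> (try simp) <;> omega
  rw [hflag]
  have hcond : ((decide (g ≠ 0) = true ∧ 4 * k ≠ 0)) = ((g ≠ 0 ∧ k ≠ 0)) := by
    simp only [eq_iff_iff]; constructor <;> intro hh <;> (try simp_all) <;> omega
  have hdiv : 4 * k / 4 = k := by omega
  simp only [hcond, hdiv, groupToks, List.append_assoc]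

theorem fold_pad4' (g k : Nat) (hg : g < 10000) (toks : List (List Char)) :
    List.foldl bStep (toks, false, 4 * k + 4) (pad4 g) =
      (toks ++ groupToks g ++ (if g ≠ 0 ∧ k ≠ 0 then [groupUnitsC.getD k []] else []),
       false, 4 * k) := by
  have h := fold_pad4 g k hg toks []
  simpa using h

theorem bDigitsRev_split (a b : Nat) (ha : a < 10000) (hb : b ≠ 0) :
    bDigitsRev (a + 10000 * b) = [a % 10, a / 10 % 10, a / 100 % 10, a / 1000] ++ bDigitsRev b := by
  have h0 : a + 10000 * b ≠ 0 := by omega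
  rw [bDigitsRev, if_neg h0]
  have e0 : (a + 10000 * b) % 10 = a % 10 := by omega
  have e1 : (a + 10000 * b) / 10 = a / 10 + 1000 * b := by omega
  rw [e0, e1, bDigitsRev, if_neg (by omega)]
  have e2 : (a / 10 + 1000 * b) % 10 = a / 10 % 10 := by omega
  have e3 : (a / 10 + 1000 * b) / 10 = a / 100 + 100 * b := by omega
  rw [e2, e3, bDigitsRev, if_neg (by omega)]
  have e4 : (a / 100 + 100 * b) % 10 = a / 100 % 10 := by omega
  have e5 : (a / 100 + 100 * b) / 10 = a / 1000 + 10 * b := by omega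
  rw [e4, e5, bDigitsRev, if_neg (by omega)]
  have e6 : (a / 1000 + 10 * b) % 10 = a / 1000 := by omega
  have e7 : (a / 1000 + 10 * b) / 10 = b := by omega
  rw [e6, e7]
  rfl

theorem fold_top (g k : Nat) (hg1 : g ≠ 0) (hg : g < 10000) (rest : List Nat) :
    List.foldl bStep ([], false, 4 * k + (bDigitsRev g).length) ((bDigitsRev g).reverse ++ rest) =
      List.foldl bStep
        (groupToks g ++ (if k ≠ 0 then [groupUnitsC.getD k []] else []), false, 4 * k) rest := by
  rcases Nat.lt_or_ge g 10 with h10 | h10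
  · have hd : bDigitsRev g = [g] := by
      rw [bDigitsRev, if_neg hg1, bDigitsRev, if_pos (by omega)]
      congr 1; omega
    rw [hd]
    simp only [List.length_cons, List.length_nil, List.reverse_cons, List.reverse_nil,
      List.nil_append, List.cons_append, List.foldl_cons]
    rw [show 4 * k + (0 + 1) = 4 * k + 1 by omega, show 4 * k + 1 = 4 * k + 1 by rfl]
    rw [bStep_bound _ _ _ _ (by omega)]
    have hflag : ((if g ≠ 0 then true else false) : Bool) = true := by simp [hg1]
    rw [hflag]
    have hcond : ((True ∧ 4 * k ≠ 0)) = ((k ≠ 0)) := by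
      simp only [true_and, eq_iff_iff]; omega
    have hdiv : 4 * k / 4 = k := by omega
    have hgt : groupToks g = pieceN g 0 := by
      unfold groupToks
      rw [show g / 1000 = 0 by omega, show g / 100 % 10 = 0 by omega,
          show g / 10 % 10 = 0 by omega, show g % 10 = g by omega]
      simp [pieceN]
    simp only [hcond, hdiv, hgt, List.nil_append]
  rcases Nat.lt_or_ge g 100 with h100 | h100
  · have hd : bDigitsRev g = [g % 10, g / 10] := by
      rw [bDigitsRev, if_neg hg1, bDigitsRev, if_neg (by omega), bDigitsRev, if_pos (by omega)]
      congr 2; omega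
    rw [hd]
    simp only [List.length_cons, List.length_nil, List.reverse_cons, List.reverse_nil,
      List.nil_append, List.cons_append, List.foldl_cons]
    rw [show 4 * k + (0 + 1 + 1) = (4 * k + 1) + 1 by omega]
    rw [bStep_mid _ _ _ _ (by omega), show (4 * k + 1) % 4 = 1 by omega]
    rw [show 4 * k + 1 = 4 * k + 1 by rfl, bStep_bound _ _ _ _ (by omega)]
    have hflag : ((if g % 10 ≠ 0 then true else if g / 10 ≠ 0 then true else false) : Bool)
        = true := by split_ifs <;> (try simp) <;> omega
    rw [hflag]
    have hcond : ((True ∧ 4 * k ≠ 0)) = ((k ≠ 0)) := by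
      simp only [true_and, eq_iff_iff]; omega
    have hdiv : 4 * k / 4 = k := by omega
    have hgt : groupToks g = pieceN (g / 10) 1 ++ pieceN (g % 10) 0 := by
      unfold groupToks
      rw [show g / 1000 = 0 by omega, show g / 100 % 10 = 0 by omega,
          show g / 10 % 10 = g / 10 by omega]
      simp [pieceN]
    simp only [hcond, hdiv, hgt, List.nil_append, List.append_assoc]
  rcases Nat.lt_or_ge g 1000 with h1000 | h1000
  · have hd : bDigitsRev g = [g % 10, g / 10 % 10, g / 100] := by
      rw [bDigitsRev, if_neg hg1, bDigitsRev, if_neg (by omega), bDigitsRev, if_neg (by omega),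
          bDigitsRev, if_pos (by omega)]
      simp only [show g / 10 / 10 % 10 = g / 100 from by omega]
    rw [hd]
    simp only [List.length_cons, List.length_nil, List.reverse_cons, List.reverse_nil,
      List.nil_append, List.cons_append, List.foldl_cons]
    rw [show 4 * k + (0 + 1 + 1 + 1) = (4 * k + 2) + 1 by omega]
    rw [bStep_mid _ _ _ _ (by omega), show (4 * k + 2) % 4 = 2 by omega]
    rw [show 4 * k + 2 = (4 * k + 1) + 1 by omega]
    rw [bStep_mid _ _ _ _ (by omega), show (4 * k + 1) % 4 = 1 by omega]
    rw [show 4 * k + 1 = 4 * k + 1 by rfl, bStep_bound _ _ _ _ (by omega)]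
    have hflag : ((if g % 10 ≠ 0 then true else if g / 10 % 10 ≠ 0 then true else
        if g / 100 ≠ 0 then true else false) : Bool) = true := by
      split_ifs <;> (try simp) <;> omega
    rw [hflag]
    have hcond : ((True ∧ 4 * k ≠ 0)) = ((k ≠ 0)) := by
      simp only [true_and, eq_iff_iff]; omega
    have hdiv : 4 * k / 4 = k := by omega
    have hgt : groupToks g = pieceN (g / 100) 2 ++ pieceN (g / 10 % 10) 1 ++ pieceN (g % 10) 0 := by
      unfold groupToks
      rw [show g / 1000 = 0 by omega, show g / 100 % 10 = g / 100 by omega]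
      simp [pieceN, List.append_assoc]
    simp only [hcond, hdiv, hgt, List.nil_append, List.append_assoc]
  · have hd : bDigitsRev g = [g % 10, g / 10 % 10, g / 100 % 10, g / 1000] := by
      rw [bDigitsRev, if_neg hg1, bDigitsRev, if_neg (by omega), bDigitsRev, if_neg (by omega),
          bDigitsRev, if_neg (by omega), bDigitsRev, if_pos (by omega)]
      simp only [show g / 10 / 10 % 10 = g / 100 % 10 from by omega,
        show g / 10 / 10 / 10 % 10 = g / 1000 from by omega]
    have hrev : (bDigitsRev g).reverse = pad4 g := by rw [hd]; rfl
    have hlen : 4 * k + (bDigitsRev g).length = 4 * k + 4 := by rw [hd]; rfl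
    rw [hrev, hlen, fold_pad4 g k (by omega)]
    have hcond : ((g ≠ 0 ∧ k ≠ 0)) = ((k ≠ 0)) := by
      simp only [eq_iff_iff]; constructor <;> intro hh <;> (try simp_all)
    simp only [hcond, List.nil_append]

theorem B_eq (m : Nat) (h0 : m ≠ 0) (hm : m ≤ 2147483648) :
    sino_int_py_alt (m : Nat) = String.ofList (PySem.Chars.join [' '] (allToks m)) := by
  have hne : ((m : Int) == 0) = false := by simp [h0]
  simp only [sino_int_py_alt, hne, Bool.false_eq_true, if_false, Int.toNat_natCast]
  congr 1
  rcases Nat.lt_or_ge m 10000 with h4 | h4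
  · -- one group
    rw [show (bDigitsRev m).length = 4 * 0 + (bDigitsRev m).length from by omega,
        show (bDigitsRev m).reverse = (bDigitsRev m).reverse ++ [] from by simp,
        fold_top m 0 h0 (by omega) []]
    have hall : allToks m = groupToks m := by
      unfold allToks
      rw [show m / 100000000 = 0 from by omega, show m % 100000000 / 10000 = 0 from by omega,
          show m % 10000 = m from by omega]
      simp
    simp [hall]
  rcases Nat.lt_or_ge m 100000000 with h8 | h8
  · -- two groups
    have hsplit := bDigitsRev_split (m % 10000) (m / 10000) (by omega) (by omega)
    rw [show m % 10000 + 10000 * (m / 10000) = m from by omega] at hsplit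
    have hrev : (bDigitsRev m).reverse
        = (bDigitsRev (m / 10000)).reverse ++ pad4 (m % 10000) := by
      rw [hsplit]; simp [pad4]
    have hlen : (bDigitsRev m).length = 4 * 1 + (bDigitsRev (m / 10000)).length := by
      rw [hsplit]; simp; omega
    rw [hrev, hlen, fold_top (m / 10000) 1 (by omega) (by omega) (pad4 (m % 10000)),
        show (4 : Nat) * 1 = 4 * 0 + 4 from by omega, fold_pad4' (m % 10000) 0 (by omega)]
    have hall : allToks m
        = groupToks (m / 10000) ++ [['만']] ++ groupToks (m % 10000) := by
      unfold allToks
      rw [show m / 100000000 = 0 from by omega, show m % 100000000 = m from by omega]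
      simp [show m / 10000 ≠ 0 from by omega]
    rw [hall]
    simp [groupUnitsC, List.append_assoc]
  · -- three groups
    have hs1 := bDigitsRev_split (m / 10000 % 10000) (m / 100000000) (by omega) (by omega)
    rw [show m / 10000 % 10000 + 10000 * (m / 100000000) = m / 10000 from by omega] at hs1
    have hsplit := bDigitsRev_split (m % 10000) (m / 10000) (by omega) (by omega)
    rw [show m % 10000 + 10000 * (m / 10000) = m from by omega] at hsplit
    have hrev : (bDigitsRev m).reverse
        = (bDigitsRev (m / 100000000)).reverse ++ pad4 (m / 10000 % 10000)
            ++ pad4 (m % 10000) := by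
      rw [hsplit, hs1]; simp [pad4]
    have hlen : (bDigitsRev m).length
        = 4 * 2 + (bDigitsRev (m / 100000000)).length := by
      rw [hsplit, hs1]; simp; omega
    rw [hrev, hlen, List.append_assoc,
        fold_top (m / 100000000) 2 (by omega) (by omega) _,
        show (4 : Nat) * 2 = 4 * 1 + 4 from by omega,
        fold_pad4 (m / 10000 % 10000) 1 (by omega),
        show (4 : Nat) * 1 = 4 * 0 + 4 from by omega,
        fold_pad4' (m % 10000) 0 (by omega)]
    have hall : allToks m
        = (groupToks (m / 100000000) ++ [['억']])
          ++ (if m / 10000 % 10000 ≠ 0 then groupToks (m / 10000 % 10000) ++ [['만']] else [])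
          ++ groupToks (m % 10000) := by
      unfold allToks
      rw [show m % 100000000 / 10000 = m / 10000 % 10000 from by omega]
      simp [show m / 100000000 ≠ 0 from by omega]
    rw [hall]
    by_cases hg1 : m / 10000 % 10000 = 0
    · simp [hg1, groupUnitsC, show groupToks 0 = [] from rfl, List.append_assoc]
    · simp [hg1, groupUnitsC, List.append_assoc]

-- ===== VERDICT (by name: the statement is the Claim_ definition above) =====
theorem sino_int_py_spec : Claim_equal_sino_int_py := by
  intro n hdom hpre
  unfold Spec_sino_int_py
  by_cases h0 : n = 0
  · subst h0; rfl
  · have hpre' : 0 ≤ n := hpre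
    have hn : n = ((n.toNat : Nat) : Int) := by omega
    have hm0 : n.toNat ≠ 0 := by omega
    have hmb : n.toNat ≤ 2147483648 := by
      unfold Dom_sino_int_py pvDomInt at hdom
      simp at hdom
      omega
    rw [hn, A_eq _ hm0 hmb, B_eq _ hm0 hmb]
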